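-- pv_equiv track=rewrite | github.com/LucaPinheiro/discord-ops-alert-py | src/discord_ops_alert/batch.py | _build_batched_message
-- ===== SOURCE A (Python) =====
-- def _build_batched_message(messages: list[str]) -> str:
--     """Build the batched message string. 1 message → as-is. N > 1 → formatted list."""
--     if len(messages) == 1:
--         return messages[0]
--
--     header = f"{len(messages)} events:\n"
--     bullets = [f"• {m}" for m in messages]
--     body = "\n".join(bullets)
--     full = header + body
--
--     if len(full) <= 2000:
--         return full
--
--     # Truncate: keep as many bullets as fit, add "... and N more"
--     result = header
--     added = 0
--     for bullet in bullets:
--         candidate = result + bullet + "\n"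
--         if len(candidate) + 20 > 2000:  # leave room for "... and N more"
--             break
--         result = candidate
--         added += 1
--     remaining = len(messages) - added
--     return result.rstrip("\n") + f"\n... and {remaining} more"
-- ===== SOURCE B (Python) =====
-- def _build_batched_message(messages: list[str]) -> str:
--     """Build the batched message string. 1 message → as-is. N > 1 → formatted list."""
--     if len(messages) == 1:
--         return messages[0]
--
--     header = f"{len(messages)} events:\n"
--     bullets = ["• " + m for m in messages]
--
--     # Prefix sums: prefix[k] = len(header) + total length of the first k bullets, each with its newline.
--     prefix = [len(header)]
--     for b in bullets:
--         prefix.append(prefix[-1] + len(b) + 1)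
--
--     if prefix[-1] - 1 <= 2000:
--         return header + "\n".join(bullets)
--
--     # prefix is strictly increasing, so the number of bullets that fit is the
--     # largest k with prefix[k] + 20 <= 2000 — found by binary search.
--     lo, hi = 0, len(bullets)
--     while lo < hi:
--         mid = (lo + hi + 1) // 2
--         if prefix[mid] + 20 <= 2000:
--             lo = mid
--         else:
--             hi = mid - 1
--     added = lo
--     remaining = len(messages) - added
--     return (header + "\n".join(bullets[:added])).rstrip("\n") + f"\n... and {remaining} more"
-- ===== Notes on version B (the rewrite author's own statement) =====
-- stated objective: alternative
-- what changed: A greedily grows the truncated result string bullet by bullet until the next bullet would overflow; B builds a prefix-sum table of bullet lengths once and finds the number of fitting bullets by binary search over it (correct since the prefix sums are strictly increasing), then assembles the output string in one shot with a join over a slice.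
import Mathlib
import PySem

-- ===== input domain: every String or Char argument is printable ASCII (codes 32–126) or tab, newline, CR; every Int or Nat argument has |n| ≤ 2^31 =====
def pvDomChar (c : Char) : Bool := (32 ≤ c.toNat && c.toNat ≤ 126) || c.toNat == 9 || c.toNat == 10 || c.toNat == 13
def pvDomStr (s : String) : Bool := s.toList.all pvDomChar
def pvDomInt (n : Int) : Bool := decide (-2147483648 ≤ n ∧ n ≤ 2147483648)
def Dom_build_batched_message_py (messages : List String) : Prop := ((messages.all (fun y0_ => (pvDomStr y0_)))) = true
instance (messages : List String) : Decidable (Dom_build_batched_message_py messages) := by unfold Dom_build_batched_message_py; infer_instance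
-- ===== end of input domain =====

-- B replaces A's greedy incremental string-growing loop by a prefix-sum table over the
-- bullet lengths and a binary search for the largest fitting count (correct because the
-- prefix sums are strictly increasing); the output string is then assembled once.

-- s.rstrip("\n"): PySem has no rstrip with an explicit char set; exact hand port
-- (drops exactly the trailing '\n' characters), shared by both ports.
def pyRstripNl (s : String) : String :=
  String.ofList ((s.toList.reverse.dropWhile (fun c => c == '\n')).reverse)

-- ===== PORT A =====
-- the 'for bullet in bullets' loop of A, state (result, added); breaking returns the state
def bbmA_loop : List String → String → Int → String × Int
  | [], result, added => (result, added)
  | bullet :: rest, result, added =>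
      let candidate := result ++ bullet ++ "\n"
      if PySem.Str.len candidate + 20 > 2000 then (result, added)
      else bbmA_loop rest candidate (added + 1)

def build_batched_message_py (messages : List String) : String :=
  if PySem.List.len messages = 1 then PySem.List.pyGetD messages 0 ""
  else
    let header := PySem.Int.toStr (PySem.List.len messages) ++ " events:\n"
    let bullets := messages.map (fun m => "• " ++ m)
    let body := PySem.Str.join "\n" bullets
    let full := header ++ body
    if PySem.Str.len full ≤ 2000 then full
    else
      let ra := bbmA_loop bullets header 0
      let remaining := PySem.List.len messages - ra.2
      pyRstripNl ra.1 ++ ("\n... and " ++ PySem.Int.toStr remaining ++ " more")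

-- ===== PORT B =====
-- B's 'for b in bullets' prefix-building loop, state = the python list 'prefix'
def bbmPrefLoop : List String → List Int → List Int
  | [], p => p
  | b :: rest, p =>
      bbmPrefLoop rest (p ++ [PySem.List.pyGetD p (-1) 0 + PySem.Str.len b + 1])

-- B's 'while lo < hi' binary-search loop, state (lo, hi); returns lo.
-- Structural recursion on an explicit fuel (hi - lo shrinks each pass, so
-- fuel = len(bullets) suffices); the fuel only makes the same loop total.
def bbmBS (pref : List Int) : Nat → Int → Int → Int
  | 0, lo, _ => lo
  | fuel + 1, lo, hi =>
      if lo < hi then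
        let mid := PySem.Int.floordiv (lo + hi + 1) 2
        if PySem.List.pyGetD pref mid 0 + 20 ≤ 2000 then bbmBS pref fuel mid hi
        else bbmBS pref fuel lo (mid - 1)
      else lo

def build_batched_message_py_alt (messages : List String) : String :=
  if PySem.List.len messages = 1 then PySem.List.pyGetD messages 0 ""
  else
    let header := PySem.Int.toStr (PySem.List.len messages) ++ " events:\n"
    let bullets := messages.map (fun m => "• " ++ m)
    let prefx := bbmPrefLoop bullets [PySem.Str.len header]
    if PySem.List.pyGetD prefx (-1) 0 - 1 ≤ 2000 then
      header ++ PySem.Str.join "\n" bullets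
    else
      let added := bbmBS prefx bullets.length 0 (PySem.List.len bullets)
      let remaining := PySem.List.len messages - added
      pyRstripNl (header ++ PySem.Str.join "\n" (PySem.List.slice bullets none (some added))) ++
        ("\n... and " ++ PySem.Int.toStr remaining ++ " more")

-- ===== PRECONDITION & SPEC =====
def Spec_build_batched_message_py (messages : List String) (out : String) : Prop := out = build_batched_message_py_alt messages
instance (messages : List String) (out : String) : Decidable (Spec_build_batched_message_py messages out) := by unfold Spec_build_batched_message_py; infer_instance

-- ===== CLAIM (what is proved, stated in full; the proofs are below) =====
def Claim_equal_build_batched_message_py : Prop := ∀ (messages : List String), Dom_build_batched_message_py messages → Spec_build_batched_message_py messages (build_batched_message_py messages)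

-- ===== LEMMAS AND PROOFS =====

-- number of bullets A's greedy loop accepts, as a Nat (proof-side only)
def bbmKfit : List String → Int → Nat
  | [], _ => 0
  | b :: rest, c => if c + PySem.Str.len b + 1 + 20 > 2000 then 0 else bbmKfit rest (c + PySem.Str.len b + 1) + 1

-- the accepted bullets each followed by a newline, concatenated (proof-side only)
def bbmCatNl : List String → String
  | [] => ""
  | b :: rest => b ++ "\n" ++ bbmCatNl rest

-- the tail of B's python 'prefix' list (everything after the seed), proof-side only
def bbmTail : List String → Int → List Int
  | [], _ => []
  | b :: rest, c => (c + PySem.Str.len b + 1) :: bbmTail rest (c + PySem.Str.len b + 1)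

-- value of B's prefix sums at index m
def bbmPfx : List String → Int → Nat → Int
  | _, c, 0 => c
  | [], c, _ + 1 => c
  | b :: rest, c, m + 1 => bbmPfx rest (c + PySem.Str.len b + 1) m

theorem bbmLen_nonneg (s : String) : 0 ≤ PySem.Str.len s := by
  rw [PySem.Str.len_eq]; exact_mod_cast Nat.zero_le _

theorem bbmPrefLoop_snoc : ∀ (bs : List String) (p : List Int) (x : Int),
    bbmPrefLoop bs (p ++ [x]) = (p ++ [x]) ++ bbmTail bs x := by
  intro bs
  induction bs with
  | nil => intro p x; simp [bbmPrefLoop, bbmTail]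
  | cons b rest ih =>
      intro p x
      simp only [bbmPrefLoop, PySem.List.pyGetD_neg_one_append_singleton]
      rw [ih (p ++ [x])]
      simp [bbmTail]

theorem bbmTail_getD : ∀ (bs : List String) (c : Int) (m : Nat), m ≤ bs.length →
    (c :: bbmTail bs c).getD m 0 = bbmPfx bs c m := by
  intro bs
  induction bs with
  | nil =>
      intro c m hm
      simp only [List.length_nil, Nat.le_zero] at hm
      subst hm
      simp [bbmTail, bbmPfx]
  | cons b rest ih =>
      intro c m hm
      cases m with
      | zero => simp [bbmPfx]
      | succ m' => simpa [bbmTail, bbmPfx] using ih (c + PySem.Str.len b + 1) m' (by simpa using hm)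

theorem bbmTail_getLast? : ∀ (bs : List String) (c : Int),
    (c :: bbmTail bs c).getLast? = some (bbmPfx bs c bs.length) := by
  intro bs
  induction bs with
  | nil => intro c; simp [bbmTail, bbmPfx]
  | cons b rest ih =>
      intro c
      rw [show bbmTail (b :: rest) c
          = (c + PySem.Str.len b + 1) :: bbmTail rest (c + PySem.Str.len b + 1) from rfl,
        List.getLast?_cons_cons, ih]
      rfl

theorem bbmPfx_ge : ∀ (bs : List String) (c : Int) (m : Nat), c ≤ bbmPfx bs c m := by
  intro bs
  induction bs with
  | nil => intro c m; cases m <;> simp [bbmPfx]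
  | cons b rest ih =>
      intro c m
      cases m with
      | zero => simp [bbmPfx]
      | succ m' =>
          have := ih (c + PySem.Str.len b + 1) m'
          have := bbmLen_nonneg b
          simp only [bbmPfx]
          omega

theorem bbmKfit_le : ∀ (bs : List String) (c : Int), bbmKfit bs c ≤ bs.length := by
  intro bs
  induction bs with
  | nil => intro c; simp [bbmKfit]
  | cons b rest ih =>
      intro c
      simp only [bbmKfit]
      split_ifs with h
      · simp
      · have := ih (c + PySem.Str.len b + 1); simpa using this

theorem bbmL1 : ∀ (bs : List String) (c : Int) (m : Nat), m ≤ bs.length →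
    bbmPfx bs c m + 20 ≤ 2000 → m ≤ bbmKfit bs c := by
  intro bs
  induction bs with
  | nil => intro c m hm _; simp only [bbmKfit]; simpa using hm
  | cons b rest ih =>
      intro c m hm hp
      cases m with
      | zero => exact Nat.zero_le _
      | succ m' =>
          have hge : c + PySem.Str.len b + 1 ≤ bbmPfx rest (c + PySem.Str.len b + 1) m' :=
            bbmPfx_ge rest _ m'
          have hp' : bbmPfx rest (c + PySem.Str.len b + 1) m' + 20 ≤ 2000 := by
            simpa [bbmPfx] using hp
          simp only [bbmKfit]
          rw [if_neg (by omega)]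
          exact Nat.succ_le_succ (ih _ m' (by simpa using hm) hp')

theorem bbmL2 : ∀ (bs : List String) (c : Int) (m : Nat), 1 ≤ m → m ≤ bs.length →
    2000 < bbmPfx bs c m + 20 → bbmKfit bs c ≤ m - 1 := by
  intro bs
  induction bs with
  | nil => intro c m h1 hm _; simp only [List.length_nil] at hm; omega
  | cons b rest ih =>
      intro c m h1 hm hp
      cases m with
      | zero => omega
      | succ m' =>
          simp only [bbmKfit]
          split_ifs with h
          · exact Nat.zero_le _
          · cases Nat.eq_zero_or_pos m' with
            | inl h0 =>
                subst h0
                have hpx : bbmPfx (b :: rest) c (0 + 1) = c + PySem.Str.len b + 1 := by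
                  simp [bbmPfx]
                omega
            | inr hpos =>
                have := ih (c + PySem.Str.len b + 1) m' hpos (by simpa using hm)
                  (by simpa [bbmPfx] using hp)
                omega

theorem bbmMid_bounds {lo hi : Int} (h : lo < hi) :
    lo < PySem.Int.floordiv (lo + hi + 1) 2 ∧ PySem.Int.floordiv (lo + hi + 1) 2 ≤ hi := by
  rw [PySem.Int.floordiv_eq_ediv_of_pos (by norm_num)]
  omega

theorem bbmBS_eq (pref : List Int) (K : Int) : ∀ (fuel : Nat) (lo hi : Int),
    (hi - lo).toNat ≤ fuel → lo ≤ K → K ≤ hi →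
    (∀ m : Int, lo < m → m ≤ hi → PySem.List.pyGetD pref m 0 + 20 ≤ 2000 → m ≤ K) →
    (∀ m : Int, lo < m → m ≤ hi → 2000 < PySem.List.pyGetD pref m 0 + 20 → K < m) →
    bbmBS pref fuel lo hi = K := by
  intro fuel
  induction fuel with
  | zero =>
      intro lo hi hn hloK hKhi _ _
      simp only [bbmBS]
      omega
  | succ fuel ihn =>
      intro lo hi hn hloK hKhi hok hbad
      simp only [bbmBS]
      by_cases hlt : lo < hi
      · rw [if_pos hlt]
        have hmid := bbmMid_bounds hlt
        set mid := PySem.Int.floordiv (lo + hi + 1) 2 with hmidd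
        by_cases hpred : PySem.List.pyGetD pref mid 0 + 20 ≤ 2000
        · rw [if_pos hpred]
          have hKm : mid ≤ K := hok mid hmid.1 hmid.2 hpred
          exact ihn mid hi (by omega) hKm hKhi
            (fun m h1 h2 h3 => hok m (by omega) h2 h3)
            (fun m h1 h2 h3 => hbad m (by omega) h2 h3)
        · rw [if_neg hpred]
          have hKm : K < mid := hbad mid hmid.1 hmid.2 (by omega)
          exact ihn lo (mid - 1) (by omega) hloK (by omega)
            (fun m h1 h2 h3 => hok m h1 (by omega) h3)
            (fun m h1 h2 h3 => hbad m h1 (by omega) h3)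
      · rw [if_neg hlt]
        omega

theorem bbmB_fit_eq : ∀ (bs : List String) (c : Int),
    bbmBS (c :: bbmTail bs c) bs.length 0 (bs.length : Int) = (bbmKfit bs c : Int) := by
  intro bs c
  apply bbmBS_eq (c :: bbmTail bs c) ((bbmKfit bs c : Int)) bs.length 0
    (bs.length : Int) (by omega) (by exact_mod_cast Int.natCast_nonneg _)
    (by exact_mod_cast bbmKfit_le bs c)
  · intro m h1 h2 h3
    have hm : m = ((m.toNat : Nat) : Int) := by omega
    have hmn : m.toNat ≤ bs.length := by omega
    rw [hm, PySem.List.pyGetD_natCast] at h3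
    have hg : (c :: bbmTail bs c).getD m.toNat 0 = bbmPfx bs c m.toNat := bbmTail_getD bs c _ hmn
    rw [hg] at h3
    have := bbmL1 bs c m.toNat hmn h3
    omega
  · intro m h1 h2 h3
    have hm : m = ((m.toNat : Nat) : Int) := by omega
    have hmn : m.toNat ≤ bs.length := by omega
    rw [hm, PySem.List.pyGetD_natCast] at h3
    rw [bbmTail_getD bs c _ hmn] at h3
    have := bbmL2 bs c m.toNat (by omega) hmn h3
    omega

theorem bbm_len_append_nl (res b : String) :
    PySem.Str.len (res ++ b ++ "\n") = PySem.Str.len res + PySem.Str.len b + 1 := by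
  rw [PySem.Str.len_append, PySem.Str.len_append]; rfl

theorem bbmA_loop_eq : ∀ (bs : List String) (res : String) (a : Int),
    bbmA_loop bs res a
      = (res ++ bbmCatNl (bs.take (bbmKfit bs (PySem.Str.len res))), a + (bbmKfit bs (PySem.Str.len res) : Int)) := by
  intro bs
  induction bs with
  | nil => intro res a; simp [bbmA_loop, bbmKfit, bbmCatNl]
  | cons b rest ih =>
      intro res a
      simp only [bbmA_loop, bbmKfit, bbm_len_append_nl]
      split_ifs with h
      · simp [bbmCatNl]
      · rw [ih, bbm_len_append_nl, Prod.mk.injEq]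
        refine ⟨?_, by push_cast; ring⟩
        apply String.toList_inj.mp
        simp [List.take_succ_cons, bbmCatNl]

theorem bbmCatNl_toList : ∀ (l : List String), l ≠ [] →
    (bbmCatNl l).toList = (PySem.Str.join "\n" l).toList ++ ['\n'] := by
  intro l
  induction l with
  | nil => intro h; exact absurd rfl h
  | cons b rest ih =>
      intro _
      cases rest with
      | nil => simp [bbmCatNl, PySem.Str.toList_join, PySem.Chars.join, List.intercalate]
      | cons c cs =>
          have h := ih (by simp)
          rw [show bbmCatNl (b :: c :: cs) = b ++ "\n" ++ bbmCatNl (c :: cs) from rfl]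
          rw [show (b ++ "\n" ++ bbmCatNl (c :: cs)).toList
              = b.toList ++ '\n' :: (bbmCatNl (c :: cs)).toList from by simp, h]
          simp [PySem.Str.toList_join, PySem.Chars.join_cons_cons]

theorem pyRstripNl_append_nl (x : String) : pyRstripNl (x ++ "\n") = pyRstripNl x := by
  apply String.toList_inj.mp
  simp [pyRstripNl]

-- foldl over per-bullet lengths, shifted seed
theorem bbmFoldl_shift : ∀ (l : List String) (c : Int),
    l.foldl (fun acc b => acc + (PySem.Str.len b + 1)) c
      = c + l.foldl (fun acc b => acc + (PySem.Str.len b + 1)) 0 := by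
  intro l
  induction l with
  | nil => intro c; simp
  | cons b rest ih =>
      intro c; simp only [List.foldl_cons]
      rw [ih (c + (PySem.Str.len b + 1)), ih (0 + (PySem.Str.len b + 1))]; ring

-- B's full prefix sum equals the foldl of the per-bullet lengths
theorem bbmPfx_full : ∀ (bs : List String) (c : Int),
    bbmPfx bs c bs.length = c + bs.foldl (fun acc b => acc + (PySem.Str.len b + 1)) 0 := by
  intro bs
  induction bs with
  | nil => simp [bbmPfx]
  | cons b rest ih =>
      intro c
      simp only [bbmPfx, List.length_cons, List.foldl_cons]
      rw [ih (c + PySem.Str.len b + 1), bbmFoldl_shift rest (0 + (PySem.Str.len b + 1))]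
      ring

-- Int length of '\n'.join(l) for nonempty l, against the per-bullet sum
theorem bbm_join_len : ∀ (l : List String), l ≠ [] →
    PySem.Str.len (PySem.Str.join "\n" l) =
      l.foldl (fun acc b => acc + (PySem.Str.len b + 1)) 0 - 1 := by
  intro l
  induction l with
  | nil => intro h; exact absurd rfl h
  | cons b rest ih =>
      intro _
      cases rest with
      | nil =>
          simp [PySem.Str.len_eq, PySem.Str.join, PySem.Chars.join, List.intercalate]
      | cons c cs =>
          have hj : (PySem.Str.join "\n" (b :: c :: cs)).toList
              = b.toList ++ '\n' :: (PySem.Str.join "\n" (c :: cs)).toList := by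
            simp [PySem.Str.toList_join, PySem.Chars.join_cons_cons]
          have hlen : (PySem.Str.join "\n" (b :: c :: cs)).toList.length
              = b.toList.length + 1 + (PySem.Str.join "\n" (c :: cs)).toList.length := by
            rw [hj]; simp; omega
          have h2 : PySem.Str.len (PySem.Str.join "\n" (b :: c :: cs))
              = PySem.Str.len b + 1 + PySem.Str.len (PySem.Str.join "\n" (c :: cs)) := by
            simp only [PySem.Str.len_eq]
            exact_mod_cast hlen
          rw [h2, ih (by simp)]
          simp only [List.foldl_cons]
          rw [bbmFoldl_shift cs (0 + (PySem.Str.len c + 1)),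
            bbmFoldl_shift cs (0 + (PySem.Str.len b + 1) + (PySem.Str.len c + 1))]
          ring

-- ===== VERDICT (by name: the statement is the Claim_ definition above) =====
theorem build_batched_message_py_spec : Claim_equal_build_batched_message_py := by
  intro messages _
  unfold Spec_build_batched_message_py build_batched_message_py build_batched_message_py_alt
  by_cases h1 : PySem.List.len messages = 1
  · simp only [if_pos h1]
  · simp only [if_neg h1]
    cases hm : messages with
    | nil => subst hm; decide
    | cons m ms =>
        rw [← hm]
        set header := PySem.Int.toStr (PySem.List.len messages) ++ " events:\n" with hh
        set bl := messages.map (fun m => "• " ++ m) with hbl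
        have hb : bl ≠ [] := by rw [hbl, hm]; simp
        -- B's prefix list
        have hpl : bbmPrefLoop bl [PySem.Str.len header]
            = PySem.Str.len header :: bbmTail bl (PySem.Str.len header) := by
          have := bbmPrefLoop_snoc bl [] (PySem.Str.len header)
          simpa using this
        rw [hpl]
        -- B's full-fit test value = A's full length (+1 shift)
        have hlast : PySem.List.pyGetD
            (PySem.Str.len header :: bbmTail bl (PySem.Str.len header)) (-1) 0
            = bbmPfx bl (PySem.Str.len header) bl.length := by
          rw [PySem.List.pyGetD_neg_one _ _ (by simp)]
          have := bbmTail_getLast? bl (PySem.Str.len header)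
          rw [List.getLast?_eq_some_getLast (by simp)] at this
          exact Option.some_injective _ this
        rw [hlast, bbmPfx_full]
        rw [PySem.Str.len_append, bbm_join_len _ hb]
        split_ifs with h2 h3 h3
        · rfl
        · omega
        · omega
        · -- truncation branch on both sides
          rw [bbmA_loop_eq]
          dsimp only
          have hbsl : PySem.List.len bl = (bl.length : Int) := by
            simp [PySem.List.len_eq]
          rw [hbsl, bbmB_fit_eq bl (PySem.Str.len header)]
          set k := bbmKfit bl (PySem.Str.len header) with hkdef
          rw [zero_add]
          have hslice : PySem.List.slice bl none (some ((k : Int))) = bl.take k :=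
            PySem.List.slice_to_natCast bl k
          rw [hslice]
          have hx : pyRstripNl (header ++ bbmCatNl (bl.take k))
              = pyRstripNl (header ++ PySem.Str.join "\n" (bl.take k)) := by
            cases htk : bl.take k with
            | nil =>
                refine congrArg pyRstripNl ?_
                apply String.toList_inj.mp
                simp [bbmCatNl, PySem.Str.toList_join, PySem.Chars.join, List.intercalate]
            | cons t ts =>
                have hcat : bbmCatNl (t :: ts)
                    = PySem.Str.join "\n" (t :: ts) ++ "\n" := by
                  apply String.toList_inj.mp
                  rw [bbmCatNl_toList _ (by simp)]
                  simp
                rw [hcat]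
                rw [show header ++ (PySem.Str.join "\n" (t :: ts) ++ "\n")
                    = (header ++ PySem.Str.join "\n" (t :: ts)) ++ "\n" from by
                  apply String.toList_inj.mp; simp]
                rw [pyRstripNl_append_nl]
          rw [hx]
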